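-- pv_equiv track=rewrite | github.com/carminacodre/SubjectivityAnalysis | data_utils.py | crop_and_pad_dataset
-- ===== SOURCE A (Python) =====
-- DEFAULT_SEQUENCE_LENGTH = 30
--
-- def crop_and_pad_dataset(vocab, sentences, sequence_length=DEFAULT_SEQUENCE_LENGTH):
--     result = []
--     pad_index = len(vocab)
--     for s in sentences:
--         if len(s) > sequence_length:
--             result.append(s[:sequence_length])
--         else:
--             result.append(s + [pad_index] * (sequence_length - len(s)))
--     return result
-- ===== SOURCE B (Python) =====
-- DEFAULT_SEQUENCE_LENGTH = 30
--
-- def crop_and_pad_dataset(vocab, sentences, sequence_length=DEFAULT_SEQUENCE_LENGTH):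
--     pad_index = len(vocab)
--     return [[s[j] if j < len(s) else pad_index for j in range(sequence_length)]
--             for s in sentences]
-- ===== Notes on version B (the rewrite author's own statement) =====
-- stated objective: alternative
-- what changed: Replaces A's branching accumulator loop over whole-list operations (slice-crop vs concatenate a computed pad block) with a position-indexed gather: every output row is built cell by cell over range(sequence_length), selecting s[j] or pad_index per position, so no slicing, no list concatenation and no length branch exist in B.
-- intended difference: For negative sequence_length where some sentence is longer than -sequence_length, A returns that sentence cropped by Python's negative-slice rule s[:sequence_length] (dropping trailing tokens), while B returns an empty row, the intended value for a requested row length that is not positive. — e.g. on crop_and_pad_dataset([], [[1, 2]], -1): A returns [[1]], B returns [[]]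
import Mathlib
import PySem

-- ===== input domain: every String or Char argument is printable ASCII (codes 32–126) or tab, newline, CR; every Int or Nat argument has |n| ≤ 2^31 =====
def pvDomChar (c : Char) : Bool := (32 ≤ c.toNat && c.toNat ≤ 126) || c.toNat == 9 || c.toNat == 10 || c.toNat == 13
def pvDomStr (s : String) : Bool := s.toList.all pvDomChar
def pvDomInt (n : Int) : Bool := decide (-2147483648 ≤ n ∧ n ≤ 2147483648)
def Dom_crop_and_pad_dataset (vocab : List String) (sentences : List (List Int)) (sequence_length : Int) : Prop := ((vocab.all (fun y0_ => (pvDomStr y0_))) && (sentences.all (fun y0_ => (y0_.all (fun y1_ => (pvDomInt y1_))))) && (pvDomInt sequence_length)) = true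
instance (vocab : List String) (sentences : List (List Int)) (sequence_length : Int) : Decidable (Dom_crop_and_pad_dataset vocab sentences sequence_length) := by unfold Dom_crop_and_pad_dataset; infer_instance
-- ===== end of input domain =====

-- B builds each output row cell by cell over range(sequence_length) (gather by index)
-- instead of A's branched slice-or-concatenate over whole lists ('alternative'); on
-- negative sequence_length with a sentence longer than -sequence_length the values
-- intentionally differ (D_ below).

-- ===== PORT A =====
-- literal port of A: accumulator loop, branch on len(s) > sequence_length
def crop_and_pad_dataset (vocab : List String) (sentences : List (List Int)) (sequence_length : Int) : List (List Int) :=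
  let pad_index : Int := (vocab.length : Int)
  sentences.foldl (fun result s =>
    if (s.length : Int) > sequence_length then
      result ++ [PySem.List.slice s none (some sequence_length)]
    else
      result ++ [s ++ List.replicate (sequence_length - (s.length : Int)).toNat pad_index]) []

-- ===== PORT B =====
-- literal port of B: per-row comprehension over range(sequence_length); s[j] is read
-- with pyGetD (exact here: the branch guarantees 0 ≤ j < len(s) whenever it is read)
def crop_and_pad_dataset_alt (vocab : List String) (sentences : List (List Int)) (sequence_length : Int) : List (List Int) :=
  let pad_index : Int := (vocab.length : Int)
  sentences.map (fun s =>
    (PySem.List.pyRange 0 sequence_length 1).map (fun j =>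
      if j < (s.length : Int) then PySem.List.pyGetD s j 0 else pad_index))

-- ===== PRECONDITION & SPEC =====
-- On negative sequence_length where some sentence is longer than -sequence_length, A
-- returns that sentence cropped by Python's negative-slice rule s[:sequence_length]
-- (dropping trailing tokens), while B returns an empty row — the intended value for a
-- requested row length that is not positive.
def D_crop_and_pad_dataset (vocab : List String) (sentences : List (List Int)) (sequence_length : Int) : Prop :=
  sequence_length < 0 ∧ ∃ s ∈ sentences, (s.length : Int) + sequence_length > 0
instance (vocab : List String) (sentences : List (List Int)) (sequence_length : Int) : Decidable (D_crop_and_pad_dataset vocab sentences sequence_length) := by unfold D_crop_and_pad_dataset; infer_instance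

def Spec_crop_and_pad_dataset (vocab : List String) (sentences : List (List Int)) (sequence_length : Int) (out : List (List Int)) : Prop := ¬ D_crop_and_pad_dataset vocab sentences sequence_length → out = crop_and_pad_dataset_alt vocab sentences sequence_length
instance (vocab : List String) (sentences : List (List Int)) (sequence_length : Int) (out : List (List Int)) : Decidable (Spec_crop_and_pad_dataset vocab sentences sequence_length out) := by unfold Spec_crop_and_pad_dataset; infer_instance

def pvDiffWitness_crop_and_pad_dataset : List String × List (List Int) × Int := ([], [[1, 2]], -1)
def pvDiffWitnessOut_crop_and_pad_dataset : (List (List Int)) × (List (List Int)) := ([[1]], [[]])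

-- ===== CLAIM (what is proved, stated in full; the proofs are below) =====
def Claim_unchanged_crop_and_pad_dataset : Prop := ∀ (vocab : List String) (sentences : List (List Int)) (sequence_length : Int), Dom_crop_and_pad_dataset vocab sentences sequence_length → Spec_crop_and_pad_dataset vocab sentences sequence_length (crop_and_pad_dataset vocab sentences sequence_length)
def Claim_changed_crop_and_pad_dataset : Prop := Dom_crop_and_pad_dataset (pvDiffWitness_crop_and_pad_dataset.1) (pvDiffWitness_crop_and_pad_dataset.2.1) (pvDiffWitness_crop_and_pad_dataset.2.2) ∧ D_crop_and_pad_dataset (pvDiffWitness_crop_and_pad_dataset.1) (pvDiffWitness_crop_and_pad_dataset.2.1) (pvDiffWitness_crop_and_pad_dataset.2.2) ∧ crop_and_pad_dataset (pvDiffWitness_crop_and_pad_dataset.1) (pvDiffWitness_crop_and_pad_dataset.2.1) (pvDiffWitness_crop_and_pad_dataset.2.2) = pvDiffWitnessOut_crop_and_pad_dataset.1 ∧ crop_and_pad_dataset_alt (pvDiffWitness_crop_and_pad_dataset.1) (pvDiffWitness_crop_and_pad_dataset.2.1) (pvDiffWitness_crop_and_pad_dataset.2.2) = pvDiffWitnessOut_crop_and_pad_dataset.2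 ∧ pvDiffWitnessOut_crop_and_pad_dataset.1 ≠ pvDiffWitnessOut_crop_and_pad_dataset.2
def Claim_exact_crop_and_pad_dataset : Prop := ∀ (vocab : List String) (sentences : List (List Int)) (sequence_length : Int), Dom_crop_and_pad_dataset vocab sentences sequence_length → D_crop_and_pad_dataset vocab sentences sequence_length → crop_and_pad_dataset vocab sentences sequence_length ≠ crop_and_pad_dataset_alt vocab sentences sequence_length

-- ===== LEMMAS AND PROOFS =====

-- A's two-branch append loop appends one element per sentence, so it is a map
theorem pv_foldl_append_ite {α β : Type} (c : α → Prop) [DecidablePred c] (f g : α → β)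
    (l : List α) (acc : List β) :
    l.foldl (fun r x => if c x then r ++ [f x] else r ++ [g x]) acc
      = acc ++ l.map (fun x => if c x then f x else g x) := by
  induction l generalizing acc with
  | nil => simp
  | cons x xs ih => by_cases h : c x <;> simp [h, ih, List.append_assoc]

theorem cropA_eq_map (vocab : List String) (sentences : List (List Int)) (L : Int) :
    crop_and_pad_dataset vocab sentences L =
    sentences.map (fun s =>
      if (s.length : Int) > L then PySem.List.slice s none (some L)
      else s ++ List.replicate (L - (s.length : Int)).toNat (vocab.length : Int)) := by
  unfold crop_and_pad_dataset
  exact pv_foldl_append_ite _ _ _ _ _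

-- B's per-row gather over range n equals take-then-pad
theorem gather_eq_take_pad (s : List Int) (p : Int) (n : Nat) :
    (List.range n).map (fun k => if k < s.length then s.getD k 0 else p)
      = s.take n ++ List.replicate (n - s.length) p := by
  apply List.ext_getElem
  · simp; omega
  · intro i hi1 hi2
    simp only [List.getElem_map, List.getElem_range]
    have hin : i < n := by simpa using hi1
    by_cases h : i < s.length
    · rw [if_pos h]
      rw [List.getElem_append_left (by simp; omega)]
      simp [List.getD, List.getElem?_eq_getElem h]
    · rw [if_neg h]
      rw [List.getElem_append_right (by simp; omega)]
      simp

-- B's row in take-then-pad form, for nonnegative L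
theorem rowB_eq (s : List Int) (p L : Int) (hL : 0 ≤ L) :
    (PySem.List.pyRange 0 L 1).map (fun j => if j < (s.length : Int) then PySem.List.pyGetD s j 0 else p)
      = s.take L.toNat ++ List.replicate (L.toNat - s.length) p := by
  rw [PySem.List.pyRange_one, List.map_map]
  have h0 : (L - 0).toNat = L.toNat := by omega
  rw [h0]
  rw [show ((fun j => if j < (s.length : Int) then PySem.List.pyGetD s j 0 else p) ∘ fun k : Nat => (0 : Int) + (k : Int))
        = fun k : Nat => if k < s.length then s.getD k 0 else p from funext fun k => by simp]
  exact gather_eq_take_pad s p L.toNat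

-- per-sentence agreement of the two rules outside the changed region
theorem row_agree (s : List Int) (p L : Int)
    (h : 0 ≤ L ∨ (s.length : Int) + L ≤ 0) :
    (if (s.length : Int) > L then PySem.List.slice s none (some L)
     else s ++ List.replicate (L - (s.length : Int)).toNat p)
      = (PySem.List.pyRange 0 L 1).map (fun j => if j < (s.length : Int) then PySem.List.pyGetD s j 0 else p) := by
  rcases le_or_gt 0 L with hL | hL
  · rw [rowB_eq s p L hL]
    split_ifs with hlen
    · -- long sentence: crop; no padding survives on the right
      rw [PySem.List.slice_to s hL]
      have : L.toNat - s.length = 0 := by omega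
      simp [this]
    · -- short sentence: take keeps all of s
      have hsl : s.length ≤ L.toNat := by omega
      rw [List.take_of_length_le hsl]
      congr 2
      omega
  · -- L < 0: outside D_ the sentence has length ≤ -L, so A's negative slice is empty
    have hshort : (s.length : Int) + L ≤ 0 := by
      rcases h with h | h
      · omega
      · exact h
    rw [if_pos (by omega)]
    rw [PySem.List.pyRange_one_eq_nil (by omega), List.map_nil]
    obtain ⟨k, hk, rfl⟩ : ∃ k : Nat, 0 < k ∧ L = -(k : Int) :=
      ⟨(-L).toNat, by omega, by omega⟩
    rw [PySem.List.slice_to_neg_natCast s k hk]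
    have : s.length - k = 0 := by omega
    simp [this]

-- inside D_ a long sentence gets a nonempty row from A and an empty row from B
theorem rows_differ_in_D (vocab : List String) (sentences : List (List Int)) (L : Int)
    (hL : L < 0) (s : List Int) (hs : s ∈ sentences) (hlong : (s.length : Int) + L > 0) :
    crop_and_pad_dataset vocab sentences L ≠ crop_and_pad_dataset_alt vocab sentences L := by
  intro heq
  rw [cropA_eq_map] at heq
  unfold crop_and_pad_dataset_alt at heq
  obtain ⟨i, hi, rfl⟩ := List.getElem_of_mem hs
  have h2 : i < (sentences.map (fun s =>
      if (s.length : Int) > L then PySem.List.slice s none (some L)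
      else s ++ List.replicate (L - (s.length : Int)).toNat (vocab.length : Int))).length := by
    simpa using hi
  have := List.ext_getElem_iff.mp heq |>.2 i h2 (by simpa using hi)
  simp only [List.getElem_map] at this
  rw [if_pos (by omega)] at this
  rw [PySem.List.pyRange_one_eq_nil (by omega), List.map_nil] at this
  have hlen := congrArg List.length this
  obtain ⟨k, hk, rfl⟩ : ∃ k : Nat, 0 < k ∧ L = -(k : Int) :=
    ⟨(-L).toNat, by omega, by omega⟩
  rw [PySem.List.slice_to_neg_natCast _ k hk] at hlen
  simp at hlen
  omega

-- ===== VERDICT (by name: the statements are the Claim_ definitions above) =====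
theorem crop_and_pad_dataset_spec : Claim_unchanged_crop_and_pad_dataset := by
  intro vocab sentences L _ hnD
  unfold crop_and_pad_dataset_alt
  rw [cropA_eq_map]
  apply List.map_congr_left
  intro s hs
  apply row_agree
  by_cases hL : 0 ≤ L
  · exact Or.inl hL
  · right
    by_contra hlong
    exact hnD ⟨by omega, s, hs, by omega⟩

theorem crop_and_pad_dataset_changed : Claim_changed_crop_and_pad_dataset := by
  unfold Claim_changed_crop_and_pad_dataset; decide

theorem crop_and_pad_dataset_tight : Claim_exact_crop_and_pad_dataset := by
  intro vocab sentences L _ hD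
  obtain ⟨hL, s, hs, hlong⟩ := hD
  exact rows_differ_in_D vocab sentences L hL s hs hlong
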